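-- pv_equiv track=rewrite | github.com/johnlewczuk/activity-tracker | tracker/vision.py | _count_context_switches
-- ===== SOURCE A (Python) =====
-- def _count_context_switches(events: list[dict]) -> int:
--     """Count app switches in event list."""
--     if len(events) < 2:
--         return 0
--     sorted_events = sorted(events, key=lambda x: x.get('start_time', ''))
--     return sum(
--         1 for i in range(1, len(sorted_events))
--         if sorted_events[i].get('app_name') != sorted_events[i-1].get('app_name')
--     )
-- ===== SOURCE B (Python) =====
-- def _count_context_switches(events: list[dict]) -> int:
--     """Count app switches by collapsing consecutive runs of the same app."""
--     if len(events) < 2: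
--         return 0
--     names = [e.get('app_name') for e in sorted(events, key=lambda x: x.get('start_time', ''))]
--     runs = 0
--     i = 0
--     n = len(names)
--     while i < n:
--         runs += 1
--         v = names[i]
--         while i < n and names[i] == v:
--             i += 1
--     return runs - 1
-- ===== Notes on version B (the rewrite author's own statement) =====
-- stated objective: alternative
-- what changed: Replaces the index-based pairwise adjacency sum over range(1, n) with projecting the sorted events to an app_name list and counting maximal runs of equal names (switches = runs - 1).
import Mathlib
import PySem

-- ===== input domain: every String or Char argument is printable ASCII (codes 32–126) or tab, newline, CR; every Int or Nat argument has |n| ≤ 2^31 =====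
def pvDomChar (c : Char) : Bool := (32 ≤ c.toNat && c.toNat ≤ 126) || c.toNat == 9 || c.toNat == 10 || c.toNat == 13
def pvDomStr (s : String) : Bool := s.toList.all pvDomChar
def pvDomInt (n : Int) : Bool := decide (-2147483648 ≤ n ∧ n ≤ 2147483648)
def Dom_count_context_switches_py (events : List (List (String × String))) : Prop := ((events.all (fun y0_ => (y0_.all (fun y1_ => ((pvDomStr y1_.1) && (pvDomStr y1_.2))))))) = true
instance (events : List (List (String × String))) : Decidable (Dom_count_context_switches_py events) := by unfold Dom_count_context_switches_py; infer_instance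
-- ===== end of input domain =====

-- B replaces A's index-based pairwise adjacency sum with run-collapsing over the
-- projected app_name list (switches = number of maximal runs - 1); same cost, different algorithm.


-- ===== PORT A =====
-- sum(1 for i in range(1, len) if sorted[i].get('app_name') != sorted[i-1].get('app_name'));
-- dict.get k → List.lookup k (first match); .get('start_time','') → .getD "".
-- pyGetD with default [] is only reached for i in range(1, len), always in range.
def count_context_switches_py (events : List (List (String × String))) : Int :=
  if events.length < 2 then 0
  else
    let sorted_events := PySem.List.sorted events (fun x => (List.lookup "start_time" x).getD "") false
    (PySem.List.pyRange 1 (sorted_events.length : Int) 1).foldl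
      (fun acc i =>
        acc + (if List.lookup "app_name" (PySem.List.pyGetD sorted_events i [])
                  ≠ List.lookup "app_name" (PySem.List.pyGetD sorted_events (i - 1) []) then 1 else 0)) 0

-- ===== PORT B =====
-- Source B's nested while loop: count one run, skip all elements equal to its first value.
def pvRunCount : List (Option String) → Int
  | [] => 0
  | x :: xs => 1 + pvRunCount (xs.dropWhile (fun y => y == x))
termination_by l => l.length
decreasing_by simpa using Nat.lt_succ_of_le (List.length_dropWhile_le _ xs)

def count_context_switches_py_alt (events : List (List (String × String))) : Int :=
  if events.length < 2 then 0
  else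
    let names := (PySem.List.sorted events (fun x => (List.lookup "start_time" x).getD "") false).map
      (fun e => List.lookup "app_name" e)
    pvRunCount names - 1

-- ===== PRECONDITION & SPEC =====
def Spec_count_context_switches_py (events : List (List (String × String))) (out : Int) : Prop := out = count_context_switches_py_alt events
instance (events : List (List (String × String))) (out : Int) : Decidable (Spec_count_context_switches_py events out) := by unfold Spec_count_context_switches_py; infer_instance

-- ===== CLAIM (what is proved, stated in full; the proofs are below) =====
def Claim_equal_count_context_switches_py : Prop := ∀ (events : List (List (String × String))), Dom_count_context_switches_py events → Spec_count_context_switches_py events (count_context_switches_py events)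

-- ===== LEMMAS AND PROOFS =====

theorem pvRunCount_cons_cons (x y : Option String) (T : List (Option String)) :
    pvRunCount (x :: y :: T) = (if y ≠ x then 1 else 0) + pvRunCount (y :: T) := by
  have L : ∀ (z : Option String) (zs : List (Option String)),
      pvRunCount (z :: zs) = 1 + pvRunCount (zs.dropWhile (fun y => y == z)) := by
    intro z zs
    simp only [pvRunCount]
  by_cases h : y = x
  · subst h
    rw [L y (y :: T), List.dropWhile_cons_of_pos (by simp), L y T]
    simp
  · rw [L x (y :: T), List.dropWhile_cons_of_neg (by simp [h])]
    simp [h, add_comm]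

theorem pv_fold_eq (s : List (List (String × String))) :
    ∀ (m k : Nat), k + m = s.length → 1 ≤ k →
      (PySem.List.pyRange (k : Int) (s.length : Int) 1).foldl
        (fun acc i =>
          acc + (if List.lookup "app_name" (PySem.List.pyGetD s i [])
                    ≠ List.lookup "app_name" (PySem.List.pyGetD s (i - 1) []) then 1 else 0)) 0
      = pvRunCount ((s.drop (k - 1)).map (fun e => List.lookup "app_name" e)) - 1 := by
  intro m
  induction m with
  | zero =>
    intro k hk h1
    have hk' : k = s.length := by omega
    have hlt : k - 1 < s.length := by omega
    rw [PySem.List.pyRange_one_eq_nil (by exact_mod_cast le_of_eq hk'.symm)]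
    rw [List.drop_eq_getElem_cons hlt]
    have : s.drop (k - 1 + 1) = [] := List.drop_of_length_le (by omega)
    rw [this]
    rw [List.map_cons, List.map_nil]
    simp only [pvRunCount, List.dropWhile_nil]
    simp
  | succ m ih =>
    intro k hk h1
    have hklt : k < s.length := by omega
    have hcons : PySem.List.pyRange (k : Int) (s.length : Int) 1
        = (k : Int) :: PySem.List.pyRange ((k : Int) + 1) (s.length : Int) 1 :=
      PySem.List.pyRange_one_cons (by exact_mod_cast hklt)
    rw [hcons, List.foldl_cons]
    -- evaluate the two lookups at index k and k-1
    have hk1 : ((k : Int) - 1) = ((k - 1 : Nat) : Int) := by omega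
    have e1 : PySem.List.pyGetD s (k : Int) ([] : List (String × String)) = s[k] := by
      rw [PySem.List.pyGetD_natCast]
      exact List.getD_eq_getElem _ _ hklt
    have e2 : PySem.List.pyGetD s ((k : Int) - 1) ([] : List (String × String)) = s[k - 1] := by
      rw [hk1, PySem.List.pyGetD_natCast]
      exact List.getD_eq_getElem _ _ (by omega)
    have hpush : ((k : Int) + 1) = (((k + 1 : Nat)) : Int) := by omega
    rw [e1, e2, hpush]
    have hA := PySem.List.foldl_add
      (l := PySem.List.pyRange ((k + 1 : Nat) : Int) (s.length : Int) 1)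
      (g := fun i => (if List.lookup "app_name" (PySem.List.pyGetD s i [])
                    ≠ List.lookup "app_name" (PySem.List.pyGetD s (i - 1) []) then (1 : Int) else 0))
      (a := (0 + if List.lookup "app_name" s[k] ≠ List.lookup "app_name" s[k - 1] then (1 : Int) else 0))
    have hB := PySem.List.foldl_add
      (l := PySem.List.pyRange ((k + 1 : Nat) : Int) (s.length : Int) 1)
      (g := fun i => (if List.lookup "app_name" (PySem.List.pyGetD s i [])
                    ≠ List.lookup "app_name" (PySem.List.pyGetD s (i - 1) []) then (1 : Int) else 0))
      (a := (0 : Int))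
    rw [hA]
    have ih' := ih (k + 1) (by omega) (by omega)
    rw [hB] at ih'
    -- rewrite drop (k-1) as getElem cons twice
    have d1 : s.drop (k - 1) = s[k - 1] :: s.drop k := by
      have := List.drop_eq_getElem_cons (l := s) (show k - 1 < s.length by omega)
      rwa [show k - 1 + 1 = k by omega] at this
    have d2 : s.drop k = s[k] :: s.drop (k + 1) := by
      have := List.drop_eq_getElem_cons (l := s) hklt
      exact this
    rw [d1, d2, List.map_cons, List.map_cons, pvRunCount_cons_cons]
    rw [show (k + 1) - 1 = k by omega, d2, List.map_cons] at ih'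
    omega

theorem count_context_switches_py_eq (events : List (List (String × String))) :
    count_context_switches_py events = count_context_switches_py_alt events := by
  unfold count_context_switches_py count_context_switches_py_alt
  by_cases h : events.length < 2
  · simp [h]
  · simp only [h, if_false]
    set s := PySem.List.sorted events (fun x => (List.lookup "start_time" x).getD "") false with hs
    have hlen : s.length = events.length := PySem.List.length_sorted _ _ _
    have := pv_fold_eq s (s.length - 1) 1 (by omega) (le_refl 1)
    simpa using this

-- ===== VERDICT (by name: the statement is the Claim_ definition above) =====
theorem count_context_switches_py_spec : Claim_equal_count_context_switches_py := by
  intro events _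
  unfold Spec_count_context_switches_py
  exact count_context_switches_py_eq events
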